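-- pv_equiv track=rewrite | github.com/kato-megumi/misc-random-script | convert/anime4k_converter/parsers/glsl.py | _group_glsl_passes
-- ===== SOURCE A (Python) =====
-- def _group_glsl_passes(passes: list[dict]) -> list[list[dict]]:
--     """Group mpv passes into compute pass groups."""
--     groups = []
--     i = 0
--     while i < len(passes):
--         p = passes[i]
--         if "Depth-to-Space" in p["desc"]:
--             groups.append([p])
--             i += 1
--             continue
--         group = [p]
--         j = i + 1
--         while j < len(passes):
--             if passes[j]["desc"] == p["desc"] and passes[j]["binds"] == p["binds"]:
--                 group.append(passes[j])
--                 j += 1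
--             else:
--                 break
--         groups.append(group)
--         i = j
--     return groups
-- ===== SOURCE B (Python) =====
-- def _group_glsl_passes(passes: list[dict]) -> list[list[dict]]:
--     """Group mpv passes into compute pass groups (single forward fold)."""
--     groups = []
--     current = None  # open group being extended, or None
--     for p in passes:
--         if "Depth-to-Space" in p["desc"]:
--             if current is not None:
--                 groups.append(current)
--                 current = None
--             groups.append([p])
--         elif current is not None and p["desc"] == current[0]["desc"] and p["binds"] == current[0]["binds"]:
--             current.append(p)
--         else:
--             if current is not None:
--                 groups.append(current)
--             current = [p]
--     if current is not None:
--         groups.append(current)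
--     return groups
-- ===== Notes on version B (the rewrite author's own statement) =====
-- stated objective: simpler
-- what changed: Replaced the two-pointer scanner (outer while with an inner while that scans the run and jumps i=j) by a single forward fold that maintains one open 'current' group, closing it on a Depth-to-Space pass or a desc/binds mismatch and flushing it at the end.
import Mathlib
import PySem

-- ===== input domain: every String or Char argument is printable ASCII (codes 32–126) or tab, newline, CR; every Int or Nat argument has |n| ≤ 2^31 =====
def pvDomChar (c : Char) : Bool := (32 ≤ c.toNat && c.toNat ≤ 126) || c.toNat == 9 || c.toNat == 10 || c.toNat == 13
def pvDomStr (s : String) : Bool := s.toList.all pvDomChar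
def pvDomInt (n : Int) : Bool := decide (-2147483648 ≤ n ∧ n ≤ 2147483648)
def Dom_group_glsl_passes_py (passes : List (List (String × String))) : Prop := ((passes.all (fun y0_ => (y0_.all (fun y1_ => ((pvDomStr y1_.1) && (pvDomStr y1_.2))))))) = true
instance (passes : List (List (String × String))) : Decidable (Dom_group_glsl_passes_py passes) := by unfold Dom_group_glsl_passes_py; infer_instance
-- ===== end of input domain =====

-- B replaces A's two-pointer run scanner (inner while + i=j jump) by one forward fold keeping an
-- open 'current' group; same return value, objective: simpler decomposition (no speed claim).

-- shared dict primitives: first-match lookup (Python p[k]; the "" default is never reached under Pre_)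
def pvLook (d : List (String × String)) (k : String) : String :=
  match d with
  | [] => ""
  | (k', v) :: rest => if k' = k then v else pvLook rest k

def pvDesc (p : List (String × String)) : String := pvLook p "desc"
def pvBinds (p : List (String × String)) : String := pvLook p "binds"
-- '"Depth-to-Space" in p["desc"]'
def pvDts (p : List (String × String)) : Bool := PySem.Str.isIn "Depth-to-Space" (pvDesc p)

-- ===== PORT A =====
-- inner 'while j < len(passes): … else break' loop: consumes the run matching p's desc/binds,
-- returns (finished group, remaining passes = passes[j:])
def aInner (p : List (String × String)) (rest : List (List (String × String)))
    (group : List (List (String × String))) :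
    List (List (String × String)) × List (List (String × String)) :=
  match rest with
  | [] => (group, [])
  | q :: rs =>
    if pvDesc q = pvDesc p ∧ pvBinds q = pvBinds p then aInner p rs (group ++ [q])
    else (group, q :: rs)

-- termination measure for the outer while (i = j jumps forward)
theorem aInner_snd_len (p : List (String × String)) (rest : List (List (String × String)))
    (group : List (List (String × String))) : (aInner p rest group).2.length ≤ rest.length := by
  induction rest generalizing group with
  | nil => simp [aInner]
  | cons q rs ih =>
    simp only [aInner]
    split
    · exact le_trans (ih _) (by simp)
    · simp

def group_glsl_passes_py (passes : List (List (String × String))) :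
    List (List (List (String × String))) :=
  match passes with
  | [] => []
  | p :: rest =>
    if pvDts p then [p] :: group_glsl_passes_py rest
    else
      let r := aInner p rest [p]
      r.1 :: group_glsl_passes_py r.2
termination_by passes.length
decreasing_by
  · simp
  · exact Nat.lt_succ_of_le (aInner_snd_len p rest [p])

-- ===== PORT B =====
-- loop state: (closed groups so far, open current group or none)
def bStep (st : List (List (List (String × String))) × Option (List (List (String × String))))
    (p : List (String × String)) :
    List (List (List (String × String))) × Option (List (List (String × String))) :=
  if pvDts p then
    match st.2 with
    | some c => (st.1 ++ [c, [p]], none)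
    | none => (st.1 ++ [[p]], none)
  else
    match st.2 with
    | some c =>
      if pvDesc p = pvDesc (c.headD []) ∧ pvBinds p = pvBinds (c.headD []) then
        (st.1, some (c ++ [p]))
      else (st.1 ++ [c], some [p])
    | none => (st.1, some [p])

-- final flush of the open group
def bFinish (st : List (List (List (String × String))) × Option (List (List (String × String)))) :
    List (List (List (String × String))) :=
  st.1 ++ (match st.2 with | none => [] | some c => [c])

def group_glsl_passes_py_alt (passes : List (List (String × String))) :
    List (List (List (String × String))) :=
  bFinish (passes.foldl bStep ([], none))

-- ===== PRECONDITION & SPEC =====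
def pvHasKey (p : List (String × String)) (k : String) : Bool := p.any (fun kv => kv.1 = k)

-- "binds" is only ever read when two neighbouring passes share a (non-Depth-to-Space) desc
def pvAdjOK (passes : List (List (String × String))) : Bool :=
  match passes with
  | [] => true
  | [_] => true
  | p :: q :: rs =>
    (if pvDesc p = pvDesc q ∧ pvDts p = false then pvHasKey p "binds" && pvHasKey q "binds"
     else true) && pvAdjOK (q :: rs)

-- Pre_ = exactly the inputs where Python A returns (outside it A raises KeyError): every pass has a
-- "desc" key, and both members of any adjacent equal-desc non-Depth-to-Space pair have a "binds" key.
def Pre_group_glsl_passes_py (passes : List (List (String × String))) : Prop :=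
  (passes.all (fun p => pvHasKey p "desc") && pvAdjOK passes) = true
instance (passes : List (List (String × String))) : Decidable (Pre_group_glsl_passes_py passes) := by
  unfold Pre_group_glsl_passes_py; infer_instance

def pvWitness_group_glsl_passes_py : (List (List (String × String))) :=
  [[("desc", "MAIN"), ("binds", "HOOKED")], [("desc", "MAIN"), ("binds", "HOOKED")]]

def Spec_group_glsl_passes_py (passes : List (List (String × String))) (out : List (List (List (String × String)))) : Prop := out = group_glsl_passes_py_alt passes
instance (passes : List (List (String × String))) (out : List (List (List (String × String)))) : Decidable (Spec_group_glsl_passes_py passes out) := by unfold Spec_group_glsl_passes_py; infer_instance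

-- ===== CLAIM (what is proved, stated in full; the proofs are below) =====
def Claim_equal_group_glsl_passes_py : Prop := ∀ (passes : List (List (String × String))), Dom_group_glsl_passes_py passes → Pre_group_glsl_passes_py passes → Spec_group_glsl_passes_py passes (group_glsl_passes_py passes)

-- ===== LEMMAS AND PROOFS =====

-- dts membership depends only on the desc string
theorem pvDts_congr {p q : List (String × String)} (h : pvDesc q = pvDesc p) :
    pvDts q = pvDts p := by simp [pvDts, h]

-- the fold invariant: closed state continues as A's outer loop; an open group headed by a
-- non-Depth-to-Space pass continues exactly as A's inner run scanner
theorem bridge (passes : List (List (String × String))) :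
    (∀ g, bFinish (passes.foldl bStep (g, none)) = g ++ group_glsl_passes_py passes)
    ∧ (∀ g p acc, pvDts p = false →
        bFinish (passes.foldl bStep (g, some (p :: acc))) =
          g ++ (aInner p passes (p :: acc)).1 ::
            group_glsl_passes_py (aInner p passes (p :: acc)).2) := by
  induction passes with
  | nil =>
    constructor
    · intro g; simp [bFinish, group_glsl_passes_py]
    · intro g p acc _; simp [bFinish, aInner, group_glsl_passes_py]
  | cons q rs ih =>
    obtain ⟨ihP, ihQ⟩ := ih
    constructor
    · intro g
      by_cases hq : pvDts q = true
      · simp only [List.foldl_cons, bStep, hq, if_true]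
        rw [ihP]
        simp [group_glsl_passes_py, hq]
      · simp only [Bool.not_eq_true] at hq
        simp only [List.foldl_cons, bStep, hq, Bool.false_eq_true, if_false]
        rw [ihQ g q [] hq]
        simp [group_glsl_passes_py, hq]
    · intro g p acc hp
      by_cases hq : pvDts q = true
      · -- q closes the group and forms its own singleton
        simp only [List.foldl_cons, bStep, hq, if_true]
        rw [ihP]
        have hne : ¬ (pvDesc q = pvDesc p ∧ pvBinds q = pvBinds p) := by
          rintro ⟨h1, _⟩
          rw [pvDts_congr h1, hp] at hq
          exact Bool.false_ne_true hq
        simp [aInner, hne, group_glsl_passes_py, hq]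
      · simp only [Bool.not_eq_true] at hq
        by_cases hm : pvDesc q = pvDesc ((p :: acc).headD []) ∧ pvBinds q = pvBinds ((p :: acc).headD [])
        · -- q extends the open group
          simp only [List.headD_cons] at hm
          simp only [List.foldl_cons, bStep, hq, Bool.false_eq_true, if_false, List.headD_cons,
            hm.1, hm.2, and_self, if_true]
          have : (p :: acc) ++ [q] = p :: (acc ++ [q]) := by simp
          rw [this, ihQ g p (acc ++ [q]) hp]
          simp [aInner, hm.1, hm.2]
        · -- mismatch: close the group, open a new one with q
          simp only [List.headD_cons] at hm
          simp only [List.foldl_cons, bStep, hq, Bool.false_eq_true, if_false, List.headD_cons,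
            hm, if_false]
          rw [ihQ (g ++ [p :: acc]) q [] hq]
          simp [aInner, hm, group_glsl_passes_py, hq]

-- ===== VERDICT (by name: the statement is the Claim_ definition above) =====
theorem group_glsl_passes_py_spec : Claim_equal_group_glsl_passes_py := by
  intro passes _ _
  unfold Spec_group_glsl_passes_py group_glsl_passes_py_alt
  rw [(bridge passes).1 []]
  simp
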